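-- pv_equiv track=rewrite | github.com/silicontalks/expolar_dac | notebook/tensorunit.py | str2hex
-- ===== SOURCE A (Python) =====
-- def str2hex(x):
--     res = 0
--     for i in range(len(x)):
--         if x[i] >= 'a' and x[i] <= 'z':
--             res = res*16 + ord(x[i])-87
--         else:
--             res = res * 16 + int(x[i])
--     return res
-- ===== SOURCE B (Python) =====
-- def _val(c):
--     return ord(c) - 87 if 'a' <= c <= 'z' else int(c)
--
-- def str2hex(x):
--     res, weight = 0, 1
--     for c in reversed(x):
--         res += _val(c) * weight
--         weight *= 16
--     return res
-- ===== Notes on version B (the rewrite author's own statement) =====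
-- stated objective: alternative
-- what changed: Replaces A's front-to-back Horner accumulation (res = res*16 + digit) with a per-character value helper and a back-to-front positional place-value sum (res += val(c)*weight, weight *= 16).
import Mathlib
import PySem

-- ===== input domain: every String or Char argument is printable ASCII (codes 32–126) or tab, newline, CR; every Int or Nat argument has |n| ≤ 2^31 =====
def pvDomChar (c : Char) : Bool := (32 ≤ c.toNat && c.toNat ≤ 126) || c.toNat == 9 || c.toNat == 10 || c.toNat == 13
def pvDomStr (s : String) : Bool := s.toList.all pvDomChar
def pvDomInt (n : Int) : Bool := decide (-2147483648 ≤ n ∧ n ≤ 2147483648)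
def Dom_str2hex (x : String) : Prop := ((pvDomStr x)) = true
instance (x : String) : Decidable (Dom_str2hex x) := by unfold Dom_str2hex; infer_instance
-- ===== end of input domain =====

-- B replaces A's front-to-back Horner accumulator (res = res*16 + digit) with a per-character
-- value helper and a back-to-front positional place-value sum; objective: alternative decomposition.

-- ===== PORT A =====
def str2hex (x : String) : Int :=
  x.toList.foldl (fun res c =>
    if 'a' ≤ c ∧ c ≤ 'z' then res * 16 + (c.toNat : Int) - 87
    else res * 16 + (PySem.Int.ofChars? [c]).getD 0) 0

-- ===== PORT B =====
def pvVal_str2hex (c : Char) : Int :=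
  if 'a' ≤ c ∧ c ≤ 'z' then (c.toNat : Int) - 87 else (PySem.Int.ofChars? [c]).getD 0

def str2hex_alt (x : String) : Int :=
  (x.toList.reverse.foldl
    (fun (p : Int × Int) c => (p.1 + pvVal_str2hex c * p.2, p.2 * 16)) (0, 1)).1

-- ===== PRECONDITION & SPEC =====
-- Pre_ excludes exactly the inputs on which A raises ValueError (int(c) on a character
-- that is neither a decimal digit nor a lowercase letter).
def Pre_str2hex (x : String) : Prop :=
  (x.toList.all (fun c => (97 ≤ c.toNat && c.toNat ≤ 122) || (48 ≤ c.toNat && c.toNat ≤ 57))) = true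
instance (x : String) : Decidable (Pre_str2hex x) := by unfold Pre_str2hex; infer_instance
def pvWitness_str2hex : String := "2f"

def Spec_str2hex (x : String) (out : Int) : Prop := out = str2hex_alt x
instance (x : String) (out : Int) : Decidable (Spec_str2hex x out) := by unfold Spec_str2hex; infer_instance

-- ===== CLAIM (what is proved, stated in full; the proofs are below) =====
def Claim_equal_str2hex : Prop := ∀ (x : String), Dom_str2hex x → Pre_str2hex x → Spec_str2hex x (str2hex x)

-- ===== LEMMAS AND PROOFS =====

-- A's loop step, named for the lemmas below.
def pvStep (res : Int) (c : Char) : Int :=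
  if 'a' ≤ c ∧ c ≤ 'z' then res * 16 + (c.toNat : Int) - 87
  else res * 16 + (PySem.Int.ofChars? [c]).getD 0

theorem pvStep_eq (a : Int) (c : Char) : pvStep a c = a * 16 + pvVal_str2hex c := by
  unfold pvStep pvVal_str2hex
  split_ifs <;> ring

-- Scaling out the accumulator of A's Horner fold.
theorem pvFold_scale (l : List Char) : ∀ a : Int,
    l.foldl pvStep a = a * 16 ^ l.length + l.foldl pvStep 0 := by
  induction l with
  | nil => intro a; simp
  | cons c t ih =>
    intro a
    simp only [List.foldl_cons, List.length_cons]
    rw [ih (pvStep a c), ih (pvStep 0 c), pvStep_eq a c, pvStep_eq 0 c]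
    ring

-- The back-to-front place-value fold carries (partial sum, current weight); its final state
-- is (Horner value of the list, 16^length).
theorem pvKey (l : List Char) :
    l.foldr (fun c (p : Int × Int) => (p.1 + pvVal_str2hex c * p.2, p.2 * 16)) (0, 1)
      = (l.foldl pvStep 0, 16 ^ l.length) := by
  induction l with
  | nil => simp
  | cons c t ih =>
    simp only [List.foldr_cons, ih, List.length_cons, List.foldl_cons]
    rw [pvFold_scale t (pvStep 0 c), pvStep_eq 0 c]
    rw [Prod.mk.injEq]
    constructor <;> ring

-- ===== VERDICT (by name: the statement is the Claim_ definition above) =====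
theorem str2hex_spec : Claim_equal_str2hex := by
  intro x _ _
  unfold Spec_str2hex str2hex str2hex_alt
  rw [List.foldl_reverse]
  show _ = (x.toList.foldr (fun c (p : Int × Int) => (p.1 + pvVal_str2hex c * p.2, p.2 * 16)) (0, 1)).1
  rw [pvKey]
  rfl
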